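-- pv_equiv track=rewrite | github.com/jjoshua2/arc_agi | unsolved/2025-10-11T03-24-44Z/e73095fd_best1.py | transform
-- ===== SOURCE A (Python) =====
-- def transform(grid_lst: list[list[int]]) -> list[list[int]]:
--     if not grid_lst or not grid_lst[0]:
--         return []
--     grid = [row[:] for row in grid_lst]
--     rows = len(grid)
--     cols = len(grid[0])
--
--     # First pass: find the maximum component size of 0s
--     visited = [[False for _ in range(cols)] for _ in range(rows)]
--     max_size = 0
--
--     def compute_size(r, c, vis):
--         stack = [(r, c)]
--         vis[r][c] = True
--         count = 1
--         while stack: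
--             x, y = stack.pop()
--             for dx, dy in [(0, 1), (0, -1), (1, 0), (-1, 0)]:
--                 nx, ny = x + dx, y + dy
--                 if 0 <= nx < rows and 0 <= ny < cols and not vis[nx][ny] and grid[nx][ny] == 0:
--                     vis[nx][ny] = True
--                     stack.append((nx, ny))
--                     count += 1
--         return count
--
--     for i in range(rows):
--         for j in range(cols):
--             if grid[i][j] == 0 and not visited[i][j]:
--                 comp_size = compute_size(i, j, visited)
--                 if comp_size > max_size:
--                     max_size = comp_size
--
--     # Second pass: fill components that are not the largest
--     visited = [[False for _ in range(cols)] for _ in range(rows)]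
--
--     def process_component(r, c, vis):
--         positions = []
--         stack = [(r, c)]
--         vis[r][c] = True
--         positions.append((r, c))
--         while stack:
--             x, y = stack.pop()
--             for dx, dy in [(0, 1), (0, -1), (1, 0), (-1, 0)]:
--                 nx, ny = x + dx, y + dy
--                 if 0 <= nx < rows and 0 <= ny < cols and not vis[nx][ny] and grid[nx][ny] == 0:
--                     vis[nx][ny] = True
--                     stack.append((nx, ny))
--                     positions.append((nx, ny))
--         comp_size = len(positions)
--         if comp_size != max_size:
--             for px, py in positions:
--                 grid[px][py] = 4
--
--     for i in range(rows):
--         for j in range(cols):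
--             if grid[i][j] == 0 and not visited[i][j]:
--                 process_component(i, j, visited)
--
--     return grid
-- ===== SOURCE B (Python) =====
-- def transform(grid_lst: list[list[int]]) -> list[list[int]]:
--     if not grid_lst or not grid_lst[0]:
--         return []
--     rows, cols = len(grid_lst), len(grid_lst[0])
--     # Single flat scan over cell indices: collect each 0-component once, as a set.
--     seen = set()
--     components = []
--     for idx in range(rows * cols):
--         i, j = divmod(idx, cols)
--         if grid_lst[i][j] == 0 and (i, j) not in seen:
--             seen.add((i, j))
--             comp = {(i, j)}
--             stack = [(i, j)]
--             while stack:
--                 x, y = stack.pop()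
--                 for nx, ny in ((x, y + 1), (x, y - 1), (x + 1, y), (x - 1, y)):
--                     if 0 <= nx < rows and 0 <= ny < cols and (nx, ny) not in seen and grid_lst[nx][ny] == 0:
--                         seen.add((nx, ny))
--                         comp.add((nx, ny))
--                         stack.append((nx, ny))
--             components.append(comp)
--     max_size = max((len(c) for c in components), default=0)
--     fill = {p for c in components if len(c) != max_size for p in c}
--     # Rebuild the grid functionally instead of mutating a copy.
--     return [[4 if (i, j) in fill else v for j, v in enumerate(row)]
--             for i, row in enumerate(grid_lst)]
-- ===== Notes on version B (the rewrite author's own statement) =====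
-- stated objective: simpler
-- what changed: Replaces A's two boolean-matrix flood-fill passes (one counting sizes, a second re-flooding every component and mutating the grid copy in place) by one flat scan over cell indices that collects each 0-component once as a set of cells, then computes the max size and rebuilds the grid functionally from a single fill set.
import Mathlib
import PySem

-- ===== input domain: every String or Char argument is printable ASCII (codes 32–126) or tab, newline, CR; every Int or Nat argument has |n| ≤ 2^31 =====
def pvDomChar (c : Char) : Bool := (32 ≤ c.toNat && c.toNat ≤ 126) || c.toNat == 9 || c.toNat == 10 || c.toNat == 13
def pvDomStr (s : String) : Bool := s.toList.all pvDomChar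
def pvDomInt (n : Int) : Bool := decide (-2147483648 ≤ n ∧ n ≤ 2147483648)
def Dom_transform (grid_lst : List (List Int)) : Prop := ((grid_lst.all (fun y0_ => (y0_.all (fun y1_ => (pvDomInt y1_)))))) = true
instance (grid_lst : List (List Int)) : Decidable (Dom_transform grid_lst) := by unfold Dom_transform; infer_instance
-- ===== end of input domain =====

-- B replaces A's two boolean-matrix flood-fill passes and in-place mutation by one flat scan
-- over cell indices that collects each 0-component once as a set of cells, then rebuilds the
-- grid functionally from a fill set (objective: simpler).

-- 2D-cell helpers (Python's grid[x][y] reads and, for A, writes; every use in the ports is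
-- guarded by 0 ≤ x < rows, 0 ≤ y < cols, so the getD defaults are never the value Python sees
-- on inputs satisfying Pre_transform).
def getG (g : List (List Int)) (x y : Nat) : Int := (g.getD x []).getD y 0
def setG (g : List (List Int)) (x y : Nat) (v : Int) : List (List Int) :=
  g.set x ((g.getD x []).set y v)
def getB (vis : List (List Bool)) (x y : Nat) : Bool := (vis.getD x []).getD y false
def setB (vis : List (List Bool)) (x y : Nat) (b : Bool) : List (List Bool) :=
  vis.set x ((vis.getD x []).set y b)

-- ===== PORT A =====
-- A's compute_size: the inner `for dx, dy in [...]` loop of one while-iteration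
-- (state: stack, vis, count).
def neighCount (g : List (List Int)) (rows cols : Nat) (x y : Nat) :
    List (Int × Int) → List (Nat × Nat) × List (List Bool) × Nat →
      List (Nat × Nat) × List (List Bool) × Nat
  | [], st => st
  | d :: ds, (stack, vis, count) =>
    let nx : Int := (x : Int) + d.1
    let ny : Int := (y : Int) + d.2
    if 0 ≤ nx ∧ nx < (rows : Int) ∧ 0 ≤ ny ∧ ny < (cols : Int) ∧
        getB vis nx.toNat ny.toNat = false ∧ getG g nx.toNat ny.toNat = 0 then
      neighCount g rows cols x y ds
        ((nx.toNat, ny.toNat) :: stack, setB vis nx.toNat ny.toNat true, count + 1)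
    else
      neighCount g rows cols x y ds (stack, vis, count)

-- A's compute_size while-loop; fuel (rows*cols+1) bounds the number of pops, which Python's
-- loop never exceeds since every pushed cell is a fresh in-bounds cell marked visited.
def floodCount (g : List (List Int)) (rows cols : Nat) :
    Nat → List (Nat × Nat) → List (List Bool) → Nat → Nat × List (List Bool)
  | 0, _, vis, count => (count, vis)
  | _ + 1, [], vis, count => (count, vis)
  | fuel + 1, (x, y) :: rest, vis, count =>
    let s := neighCount g rows cols x y [(0, 1), (0, -1), (1, 0), (-1, 0)] (rest, vis, count)
    floodCount g rows cols fuel s.1 s.2.1 s.2.2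

-- A's process_component inner neighbour loop (state: stack, vis, positions).
def neighPos (g : List (List Int)) (rows cols : Nat) (x y : Nat) :
    List (Int × Int) → List (Nat × Nat) × List (List Bool) × List (Nat × Nat) →
      List (Nat × Nat) × List (List Bool) × List (Nat × Nat)
  | [], st => st
  | d :: ds, (stack, vis, pos) =>
    let nx : Int := (x : Int) + d.1
    let ny : Int := (y : Int) + d.2
    if 0 ≤ nx ∧ nx < (rows : Int) ∧ 0 ≤ ny ∧ ny < (cols : Int) ∧
        getB vis nx.toNat ny.toNat = false ∧ getG g nx.toNat ny.toNat = 0 then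
      neighPos g rows cols x y ds
        ((nx.toNat, ny.toNat) :: stack, setB vis nx.toNat ny.toNat true,
          pos ++ [(nx.toNat, ny.toNat)])
    else
      neighPos g rows cols x y ds (stack, vis, pos)

-- A's process_component while-loop.
def floodPos (g : List (List Int)) (rows cols : Nat) :
    Nat → List (Nat × Nat) → List (List Bool) → List (Nat × Nat) →
      List (Nat × Nat) × List (List Bool)
  | 0, _, vis, pos => (pos, vis)
  | _ + 1, [], vis, pos => (pos, vis)
  | fuel + 1, (x, y) :: rest, vis, pos =>
    let s := neighPos g rows cols x y [(0, 1), (0, -1), (1, 0), (-1, 0)] (rest, vis, pos)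
    floodPos g rows cols fuel s.1 s.2.1 s.2.2

def transform (grid_lst : List (List Int)) : List (List Int) :=
  if grid_lst.isEmpty then [] else
  if (grid_lst.headD []).isEmpty then [] else
  let grid := grid_lst            -- `[row[:] for row in grid_lst]`: a copy; values immutable here
  let rows := grid.length
  let cols := (grid.headD []).length
  let fuel := rows * cols + 1
  -- first pass: maximum 0-component size (state: visited, max_size)
  let p1 := (List.range rows).foldl (fun st i =>
      (List.range cols).foldl (fun st j =>
        if getG grid i j = 0 ∧ getB st.1 i j = false then
          let r := floodCount grid rows cols fuel [(i, j)] (setB st.1 i j true) 1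
          (r.2, if r.1 > st.2 then r.1 else st.2)
        else st) st)
    (List.replicate rows (List.replicate cols false), 0)
  let maxSize := p1.2
  -- second pass: re-flood and fill (state: grid, visited)
  let p2 := (List.range rows).foldl (fun st i =>
      (List.range cols).foldl (fun st j =>
        if getG st.1 i j = 0 ∧ getB st.2 i j = false then
          let r := floodPos st.1 rows cols fuel [(i, j)] (setB st.2 i j true) [(i, j)]
          (if r.1.length ≠ maxSize then r.1.foldl (fun gg p => setG gg p.1 p.2 4) st.1
           else st.1, r.2)
        else st) st)
    (grid, List.replicate rows (List.replicate cols false))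
  p2.1

-- ===== PORT B =====
-- B's four neighbour coordinates of (x, y), in Python's tuple order.
def nbrs (x y : Nat) : List (Int × Int) :=
  [((x : Int), (y : Int) + 1), ((x : Int), (y : Int) - 1),
   ((x : Int) + 1, (y : Int)), ((x : Int) - 1, (y : Int))]

-- body of B's `for nx, ny in (...)` loop (state: stack, seen, comp).
def step (g : List (List Int)) (rows cols : Nat)
    (st : List (Nat × Nat) × PySem.Set (Nat × Nat) × PySem.Set (Nat × Nat)) (n : Int × Int) :
    List (Nat × Nat) × PySem.Set (Nat × Nat) × PySem.Set (Nat × Nat) :=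
  if 0 ≤ n.1 ∧ n.1 < (rows : Int) ∧ 0 ≤ n.2 ∧ n.2 < (cols : Int) ∧
      PySem.Set.contains st.2.1 (n.1.toNat, n.2.toNat) = false ∧
      getG g n.1.toNat n.2.toNat = 0 then
    ((n.1.toNat, n.2.toNat) :: st.1,
      PySem.Set.add st.2.1 (n.1.toNat, n.2.toNat),
      PySem.Set.add st.2.2 (n.1.toNat, n.2.toNat))
  else st

-- B's `while stack:` loop; fuel (rows*cols+1) bounds the number of pops, which Python's loop
-- never exceeds since every pushed cell is a fresh in-bounds cell added to `seen`.
def bfs (g : List (List Int)) (rows cols : Nat) :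
    Nat → List (Nat × Nat) → PySem.Set (Nat × Nat) → PySem.Set (Nat × Nat) →
      PySem.Set (Nat × Nat) × PySem.Set (Nat × Nat)
  | 0, _, seen, comp => (seen, comp)
  | _ + 1, [], seen, comp => (seen, comp)
  | fuel + 1, (x, y) :: rest, seen, comp =>
    let s := (nbrs x y).foldl (step g rows cols) (rest, seen, comp)
    bfs g rows cols fuel s.1 s.2.1 s.2.2

def transform_alt (grid_lst : List (List Int)) : List (List Int) :=
  if grid_lst.isEmpty then [] else
  if (grid_lst.headD []).isEmpty then [] else
  let rows := grid_lst.length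
  let cols := (grid_lst.headD []).length
  let fuel := rows * cols + 1
  -- single flat scan over cell indices: collect each 0-component once (state: seen, components)
  let scan := (List.range (rows * cols)).foldl (fun st idx =>
      let i := idx / cols
      let j := idx % cols
      if getG grid_lst i j = 0 ∧ PySem.Set.contains st.1 (i, j) = false then
        let r := bfs grid_lst rows cols fuel [(i, j)]
          (PySem.Set.add st.1 (i, j)) (PySem.Set.ofList [(i, j)])
        (r.1, st.2 ++ [r.2])
      else st)
    ((PySem.Set.empty : PySem.Set (Nat × Nat)), ([] : List (PySem.Set (Nat × Nat))))
  let comps := scan.2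
  -- max((len(c) for c in components), default=0)
  let maxSize : Int := (comps.map PySem.Set.len).foldl max 0
  -- fill = {p for c in components if len(c) != max_size for p in c}
  let fill := PySem.Set.ofList
    ((comps.filter (fun c => decide (PySem.Set.len c ≠ maxSize))).flatMap (fun c => c))
  -- rebuild the grid functionally instead of mutating a copy
  grid_lst.mapIdx (fun i row =>
    row.mapIdx (fun j v => if PySem.Set.contains fill (i, j) = true then 4 else v))

-- ===== PRECONDITION & SPEC =====
-- Pre_ excludes exactly the inputs on which Python A raises IndexError: a grid whose first row
-- is longer than some later row (cols = len(grid[0]) is indexed into every row).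
def Pre_transform (grid_lst : List (List Int)) : Prop :=
  ∀ row ∈ grid_lst, (grid_lst.headD []).length ≤ row.length
instance (grid_lst : List (List Int)) : Decidable (Pre_transform grid_lst) := by
  unfold Pre_transform; infer_instance

def pvWitness_transform : List (List Int) := [[0, 1, 0], [0, 0, 1], [1, 0, 0]]

def Spec_transform (grid_lst : List (List Int)) (out : List (List Int)) : Prop :=
  out = transform_alt grid_lst
instance (grid_lst : List (List Int)) (out : List (List Int)) : Decidable (Spec_transform grid_lst out) := by
  unfold Spec_transform; infer_instance

-- ===== CLAIM (what is proved, stated in full; the proofs are below) =====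
def Claim_equal_transform : Prop := ∀ (grid_lst : List (List Int)), Dom_transform grid_lst →
  Pre_transform grid_lst → Spec_transform grid_lst (transform grid_lst)

-- ===== LEMMAS AND PROOFS =====

-- proof-side reference flood fill over a boolean visited matrix, keeping the component as a
-- position list; A's two passes and B's set-based scan are each proved equal to it.
def neighFill (g : List (List Int)) (rows cols : Nat) (x y : Nat) :
    List (Int × Int) → List (Nat × Nat) × List (List Bool) × List (Nat × Nat) →
      List (Nat × Nat) × List (List Bool) × List (Nat × Nat)
  | [], st => st
  | d :: ds, (stack, vis, pos) =>
    let nx : Int := (x : Int) + d.1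
    let ny : Int := (y : Int) + d.2
    if 0 ≤ nx ∧ nx < (rows : Int) ∧ 0 ≤ ny ∧ ny < (cols : Int) ∧
        getB vis nx.toNat ny.toNat = false ∧ getG g nx.toNat ny.toNat = 0 then
      neighFill g rows cols x y ds
        ((nx.toNat, ny.toNat) :: stack, setB vis nx.toNat ny.toNat true,
          pos ++ [(nx.toNat, ny.toNat)])
    else
      neighFill g rows cols x y ds (stack, vis, pos)

def floodFill (g : List (List Int)) (rows cols : Nat) :
    Nat → List (Nat × Nat) → List (List Bool) → List (Nat × Nat) →
      List (Nat × Nat) × List (List Bool)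
  | 0, _, vis, pos => (pos, vis)
  | _ + 1, [], vis, pos => (pos, vis)
  | fuel + 1, (x, y) :: rest, vis, pos =>
    let s := neighFill g rows cols x y [(0, 1), (0, -1), (1, 0), (-1, 0)] (rest, vis, pos)
    floodFill g rows cols fuel s.1 s.2.1 s.2.2

-- generic getD/set fact used by all cell lemmas
theorem pv_getD_set {α : Type} (l : List α) (i n : Nat) (a d : α) :
    (l.set i a).getD n d = if i = n ∧ i < l.length then a else l.getD n d := by
  simp only [List.getD_eq_getElem?_getD, List.getElem?_set]
  split_ifs with h1 h2 h3 h4 <;> first | rfl | (try simp_all) <;> omega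

theorem getB_setB (vis : List (List Bool)) (a b x y : Nat) (v : Bool) :
    getB (setB vis a b v) x y =
      if a = x ∧ a < vis.length ∧ b = y ∧ b < (vis.getD a []).length then v
      else getB vis x y := by
  unfold getB setB
  rw [pv_getD_set]
  by_cases hax : a = x
  · subst hax
    by_cases ha : a < vis.length
    · rw [if_pos ⟨rfl, ha⟩, pv_getD_set]
      by_cases hby : b = y
      · subst hby
        by_cases hb : b < (vis.getD a []).length
        · rw [if_pos ⟨rfl, hb⟩, if_pos ⟨rfl, ha, rfl, hb⟩]
        · rw [if_neg (by tauto), if_neg (by tauto)]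
      · rw [if_neg (by tauto), if_neg (by tauto)]
    · rw [if_neg (by tauto), if_neg (by tauto)]
  · rw [if_neg (by tauto), if_neg (by tauto)]

theorem getG_setG (g : List (List Int)) (a b x y : Nat) (v : Int) :
    getG (setG g a b v) x y =
      if a = x ∧ a < g.length ∧ b = y ∧ b < (g.getD a []).length then v
      else getG g x y := by
  unfold getG setG
  rw [pv_getD_set]
  by_cases hax : a = x
  · subst hax
    by_cases ha : a < g.length
    · rw [if_pos ⟨rfl, ha⟩, pv_getD_set]
      by_cases hby : b = y
      · subst hby
        by_cases hb : b < (g.getD a []).length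
        · rw [if_pos ⟨rfl, hb⟩, if_pos ⟨rfl, ha, rfl, hb⟩]
        · rw [if_neg (by tauto), if_neg (by tauto)]
      · rw [if_neg (by tauto), if_neg (by tauto)]
    · rw [if_neg (by tauto), if_neg (by tauto)]
  · rw [if_neg (by tauto), if_neg (by tauto)]

def VisLe (v w : List (List Bool)) : Prop := ∀ x y, getB v x y = true → getB w x y = true

def VisDims (vis : List (List Bool)) (rows cols : Nat) : Prop :=
  vis.length = rows ∧ ∀ row ∈ vis, row.length = cols

theorem visLe_refl (v : List (List Bool)) : VisLe v v := fun _ _ h => h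

theorem visLe_trans {u v w : List (List Bool)} (h1 : VisLe u v) (h2 : VisLe v w) : VisLe u w :=
  fun x y h => h2 x y (h1 x y h)

theorem visLe_setB (vis : List (List Bool)) (a b : Nat) : VisLe vis (setB vis a b true) := by
  intro x y h
  rw [getB_setB]
  split_ifs with h1
  · rfl
  · exact h

theorem getB_setB_self (vis : List (List Bool)) (a b : Nat)
    (ha : a < vis.length) (hb : b < (vis.getD a []).length) :
    getB (setB vis a b true) a b = true := by
  rw [getB_setB, if_pos ⟨rfl, ha, rfl, hb⟩]

theorem setB_dims {vis : List (List Bool)} {rows cols : Nat} (h : VisDims vis rows cols)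
    (a b : Nat) (v : Bool) : VisDims (setB vis a b v) rows cols := by
  by_cases ha : a < vis.length
  · refine ⟨by simpa [setB] using h.1, fun row hrow => ?_⟩
    rcases List.mem_or_eq_of_mem_set hrow with h' | h'
    · exact h.2 _ h'
    · subst h'
      rw [List.length_set, List.getD_eq_getElem _ _ ha]
      exact h.2 _ (List.getElem_mem ha)
  · rw [setB, List.set_eq_of_length_le (by omega)]
    exact h

theorem visDims_getD {vis : List (List Bool)} {rows cols : Nat} (h : VisDims vis rows cols)
    {a : Nat} (ha : a < rows) : (vis.getD a []).length = cols := by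
  have ha' : a < vis.length := h.1 ▸ ha
  rw [List.getD_eq_getElem _ _ ha']
  exact h.2 _ (List.getElem_mem ha')

theorem getG_fill_not_mem (pos : List (Nat × Nat)) (g : List (List Int)) (x y : Nat)
    (h : (x, y) ∉ pos) :
    getG (pos.foldl (fun gg p => setG gg p.1 p.2 4) g) x y = getG g x y := by
  induction pos generalizing g with
  | nil => rfl
  | cons q rest ih =>
    simp only [List.foldl_cons]
    rw [ih _ (fun hm => h (List.mem_cons_of_mem _ hm)), getG_setG, if_neg]
    rintro ⟨h1, -, h2, -⟩
    exact h (by simp [← h1, ← h2])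

-- A's two flood loops are the same loop as the reference, with the count kept instead of /
-- alongside the positions list.
theorem neighPos_eq_neighFill (g : List (List Int)) (rows cols x y : Nat) :
    ∀ (ds : List (Int × Int)) st, neighPos g rows cols x y ds st = neighFill g rows cols x y ds st := by
  intro ds
  induction ds with
  | nil => rintro ⟨stack, vis, pos⟩; rfl
  | cons d ds ih =>
    rintro ⟨stack, vis, pos⟩
    simp only [neighPos, neighFill]
    split_ifs with h <;> exact ih _

theorem floodPos_eq_floodFill (g : List (List Int)) (rows cols : Nat) :
    ∀ (fuel : Nat) stack vis pos,
      floodPos g rows cols fuel stack vis pos = floodFill g rows cols fuel stack vis pos := by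
  intro fuel
  induction fuel with
  | zero => intro stack vis pos; rfl
  | succ fuel ih =>
    rintro (_ | ⟨⟨x, y⟩, rest⟩) vis pos
    · rfl
    · simp only [floodPos, floodFill, neighPos_eq_neighFill]
      exact ih _ _ _

theorem neighCount_eq (g : List (List Int)) (rows cols x y : Nat) :
    ∀ (ds : List (Int × Int)) stack vis (cnt : Nat) pos, cnt = pos.length →
      neighCount g rows cols x y ds (stack, vis, cnt) =
        ((neighFill g rows cols x y ds (stack, vis, pos)).1,
         (neighFill g rows cols x y ds (stack, vis, pos)).2.1,
         (neighFill g rows cols x y ds (stack, vis, pos)).2.2.length) := by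
  intro ds
  induction ds with
  | nil => intro stack vis cnt pos h; simp [neighCount, neighFill, h]
  | cons d ds ih =>
    intro stack vis cnt pos h
    simp only [neighCount, neighFill]
    split_ifs with hc
    · exact ih _ _ _ _ (by simp [h])
    · exact ih _ _ _ _ h

theorem floodCount_eq (g : List (List Int)) (rows cols : Nat) :
    ∀ (fuel : Nat) stack vis (cnt : Nat) pos, cnt = pos.length →
      floodCount g rows cols fuel stack vis cnt =
        ((floodFill g rows cols fuel stack vis pos).1.length,
         (floodFill g rows cols fuel stack vis pos).2) := by
  intro fuel
  induction fuel with
  | zero => intro stack vis cnt pos h; simp [floodCount, floodFill, h]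
  | succ fuel ih =>
    rintro (_ | ⟨⟨x, y⟩, rest⟩) vis cnt pos h
    · simp [floodCount, floodFill, h]
    · simp only [floodCount, floodFill]
      rw [neighCount_eq g rows cols x y _ _ _ _ _ h]
      exact ih _ _ _ _ rfl

theorem neighFill_visLe (g : List (List Int)) (rows cols x y : Nat) :
    ∀ (ds : List (Int × Int)) stack vis pos,
      VisLe vis (neighFill g rows cols x y ds (stack, vis, pos)).2.1 := by
  intro ds
  induction ds with
  | nil => intro stack vis pos; exact visLe_refl _
  | cons d ds ih =>
    intro stack vis pos
    simp only [neighFill]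
    split_ifs with h
    · exact visLe_trans (visLe_setB _ _ _) (ih _ _ _)
    · exact ih _ _ _

theorem floodFill_visLe (g : List (List Int)) (rows cols : Nat) :
    ∀ (fuel : Nat) stack vis pos, VisLe vis (floodFill g rows cols fuel stack vis pos).2 := by
  intro fuel
  induction fuel with
  | zero => intro stack vis pos; exact visLe_refl _
  | succ fuel ih =>
    rintro (_ | ⟨⟨x, y⟩, rest⟩) vis pos
    · exact visLe_refl _
    · simp only [floodFill]
      exact visLe_trans (neighFill_visLe g rows cols x y _ rest vis pos) (ih _ _ _)

theorem neighFill_inv (g : List (List Int)) (rows cols x y : Nat) :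
    ∀ (ds : List (Int × Int)) stack vis pos, VisDims vis rows cols →
      (∀ p ∈ stack, getB vis p.1 p.2 = true) → (∀ p ∈ pos, getB vis p.1 p.2 = true) →
      VisDims (neighFill g rows cols x y ds (stack, vis, pos)).2.1 rows cols ∧
      (∀ p ∈ (neighFill g rows cols x y ds (stack, vis, pos)).1,
        getB (neighFill g rows cols x y ds (stack, vis, pos)).2.1 p.1 p.2 = true) ∧
      (∀ p ∈ (neighFill g rows cols x y ds (stack, vis, pos)).2.2,
        getB (neighFill g rows cols x y ds (stack, vis, pos)).2.1 p.1 p.2 = true) := by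
  intro ds
  induction ds with
  | nil => intro stack vis pos hd hs hp; exact ⟨hd, hs, hp⟩
  | cons d ds ih =>
    intro stack vis pos hd hs hp
    simp only [neighFill]
    split_ifs with hc
    · obtain ⟨hnx0, hnxr, hny0, hnyc, hvf, hg0⟩ := hc
      have hltr : ((x : Int) + d.1).toNat < rows := by omega
      have hltc : ((y : Int) + d.2).toNat < cols := by omega
      have hself : getB (setB vis ((x : Int) + d.1).toNat ((y : Int) + d.2).toNat true)
          ((x : Int) + d.1).toNat ((y : Int) + d.2).toNat = true :=
        getB_setB_self _ _ _ (by rw [hd.1]; exact hltr)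
          (by rw [visDims_getD hd hltr]; exact hltc)
      refine ih _ _ _ (setB_dims hd _ _ _) ?_ ?_
      · intro p hm
        rcases List.mem_cons.mp hm with rfl | hm
        · exact hself
        · exact visLe_setB _ _ _ _ _ (hs _ hm)
      · intro p hm
        rcases List.mem_append.mp hm with hm | hm
        · exact visLe_setB _ _ _ _ _ (hp _ hm)
        · simp only [List.mem_singleton] at hm
          subst hm
          exact hself
    · exact ih _ _ _ hd hs hp

theorem floodFill_inv (g : List (List Int)) (rows cols : Nat) :
    ∀ (fuel : Nat) stack vis pos, VisDims vis rows cols →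
      (∀ p ∈ stack, getB vis p.1 p.2 = true) → (∀ p ∈ pos, getB vis p.1 p.2 = true) →
      VisDims (floodFill g rows cols fuel stack vis pos).2 rows cols ∧
      (∀ p ∈ (floodFill g rows cols fuel stack vis pos).1,
        getB (floodFill g rows cols fuel stack vis pos).2 p.1 p.2 = true) := by
  intro fuel
  induction fuel with
  | zero => intro stack vis pos hd hs hp; exact ⟨hd, hp⟩
  | succ fuel ih =>
    rintro (_ | ⟨⟨x, y⟩, rest⟩) vis pos hd hs hp
    · exact ⟨hd, hp⟩
    · simp only [floodFill]
      obtain ⟨hd', hs', hp'⟩ :=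
        neighFill_inv g rows cols x y [(0, 1), (0, -1), (1, 0), (-1, 0)] rest vis pos hd
          (fun p hm => hs p (List.mem_cons_of_mem _ hm)) hp
      exact ih _ _ _ hd' hs' hp'

-- the flood fill reads the grid only at currently-unvisited cells
theorem neighFill_agree (g1 g2 : List (List Int)) (rows cols x y : Nat)
    (vis0 : List (List Bool))
    (H : ∀ u w, getB vis0 u w = false → getG g1 u w = getG g2 u w) :
    ∀ (ds : List (Int × Int)) stack vis pos, VisLe vis0 vis →
      neighFill g1 rows cols x y ds (stack, vis, pos) =
        neighFill g2 rows cols x y ds (stack, vis, pos) := by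
  intro ds
  induction ds with
  | nil => intro stack vis pos hLe; rfl
  | cons d ds ih =>
    intro stack vis pos hLe
    have hgg : getB vis ((x : Int) + d.1).toNat ((y : Int) + d.2).toNat = false →
        getG g1 ((x : Int) + d.1).toNat ((y : Int) + d.2).toNat =
          getG g2 ((x : Int) + d.1).toNat ((y : Int) + d.2).toNat := by
      intro hf
      refine H _ _ ?_
      cases hv0 : getB vis0 ((x : Int) + d.1).toNat ((y : Int) + d.2).toNat
      · rfl
      · rw [hLe _ _ hv0] at hf; exact hf.symm ▸ rfl
    simp only [neighFill]
    split_ifs with h1 h2 h2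
    · exact ih _ _ _ (visLe_trans hLe (visLe_setB _ _ _))
    · exact absurd ⟨h1.1, h1.2.1, h1.2.2.1, h1.2.2.2.1, h1.2.2.2.2.1,
        by rw [← hgg h1.2.2.2.2.1]; exact h1.2.2.2.2.2⟩ h2
    · exact absurd ⟨h2.1, h2.2.1, h2.2.2.1, h2.2.2.2.1, h2.2.2.2.2.1,
        by rw [hgg h2.2.2.2.2.1]; exact h2.2.2.2.2.2⟩ h1
    · exact ih _ _ _ hLe

theorem floodFill_agree (g1 g2 : List (List Int)) (rows cols : Nat)
    (vis0 : List (List Bool))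
    (H : ∀ u w, getB vis0 u w = false → getG g1 u w = getG g2 u w) :
    ∀ (fuel : Nat) stack vis pos, VisLe vis0 vis →
      floodFill g1 rows cols fuel stack vis pos = floodFill g2 rows cols fuel stack vis pos := by
  intro fuel
  induction fuel with
  | zero => intro stack vis pos hLe; rfl
  | succ fuel ih =>
    rintro (_ | ⟨⟨x, y⟩, rest⟩) vis pos hLe
    · rfl
    · simp only [floodFill]
      rw [neighFill_agree g1 g2 rows cols x y vis0 H _ rest vis pos hLe]
      exact ih _ _ _
        (visLe_trans hLe (neighFill_visLe g2 rows cols x y _ rest vis pos))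

-- flattening the two nested range folds into one fold over the cell list
def cells (rows cols : Nat) : List (Nat × Nat) :=
  (List.range rows).flatMap (fun i => (List.range cols).map (fun j => (i, j)))

theorem foldl_cells {s : Type} (f : s → Nat → Nat → s) (rows cols : Nat) (init : s) :
    (List.range rows).foldl (fun st i =>
        (List.range cols).foldl (fun st j => f st i j) st) init =
      (cells rows cols).foldl (fun st p => f st p.1 p.2) init := by
  unfold cells
  rw [List.foldl_flatMap]
  have h : (fun (st : s) (i : Nat) => (List.range cols).foldl (fun st j => f st i j) st) =
      (fun (st : s) (i : Nat) =>
        ((List.range cols).map (fun j => (i, j))).foldl (fun st p => f st p.1 p.2) st) := by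
    funext st i
    rw [List.foldl_map]
  rw [h]

theorem mem_cells {rows cols : Nat} {p : Nat × Nat} :
    p ∈ cells rows cols ↔ p.1 < rows ∧ p.2 < cols := by
  cases p with
  | mk a b => simp [cells]

-- the collecting scan's components list is accumulator-independent
theorem collect_acc (grid : List (List Int)) (rows cols fuel : Nat) :
    ∀ (cs : List (Nat × Nat)) vis (comps : List (List (Nat × Nat))),
      cs.foldl (fun st p =>
          if getG grid p.1 p.2 = 0 ∧ getB st.1 p.1 p.2 = false then
            ((floodFill grid rows cols fuel [p] (setB st.1 p.1 p.2 true) [p]).2,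
              st.2 ++ [(floodFill grid rows cols fuel [p] (setB st.1 p.1 p.2 true) [p]).1])
          else st) (vis, comps) =
        ((cs.foldl (fun st p =>
          if getG grid p.1 p.2 = 0 ∧ getB st.1 p.1 p.2 = false then
            ((floodFill grid rows cols fuel [p] (setB st.1 p.1 p.2 true) [p]).2,
              st.2 ++ [(floodFill grid rows cols fuel [p] (setB st.1 p.1 p.2 true) [p]).1])
          else st) (vis, ([] : List (List (Nat × Nat))))).1,
         comps ++ (cs.foldl (fun st p =>
          if getG grid p.1 p.2 = 0 ∧ getB st.1 p.1 p.2 = false then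
            ((floodFill grid rows cols fuel [p] (setB st.1 p.1 p.2 true) [p]).2,
              st.2 ++ [(floodFill grid rows cols fuel [p] (setB st.1 p.1 p.2 true) [p]).1])
          else st) (vis, ([] : List (List (Nat × Nat))))).2) := by
  intro cs
  induction cs with
  | nil => intro vis comps; simp
  | cons p cs ih =>
    intro vis comps
    simp only [List.foldl_cons]
    split_ifs with hc
    · rw [ih _ ([] ++ [_]), ih _ (comps ++ [_])]
      simp
    · exact ih _ _

-- A's first pass computes the running maximum of the collected components' sizes
theorem pass1_eq (grid : List (List Int)) (rows cols fuel : Nat) :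
    ∀ (cs : List (Nat × Nat)) vis (m : Nat),
      cs.foldl (fun st p =>
          if getG grid p.1 p.2 = 0 ∧ getB st.1 p.1 p.2 = false then
            ((floodCount grid rows cols fuel [p] (setB st.1 p.1 p.2 true) 1).2,
             if (floodCount grid rows cols fuel [p] (setB st.1 p.1 p.2 true) 1).1 > st.2 then
               (floodCount grid rows cols fuel [p] (setB st.1 p.1 p.2 true) 1).1
             else st.2)
          else st) (vis, m) =
        ((cs.foldl (fun st p =>
          if getG grid p.1 p.2 = 0 ∧ getB st.1 p.1 p.2 = false then
            ((floodFill grid rows cols fuel [p] (setB st.1 p.1 p.2 true) [p]).2,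
              st.2 ++ [(floodFill grid rows cols fuel [p] (setB st.1 p.1 p.2 true) [p]).1])
          else st) (vis, ([] : List (List (Nat × Nat))))).1,
         ((cs.foldl (fun st p =>
          if getG grid p.1 p.2 = 0 ∧ getB st.1 p.1 p.2 = false then
            ((floodFill grid rows cols fuel [p] (setB st.1 p.1 p.2 true) [p]).2,
              st.2 ++ [(floodFill grid rows cols fuel [p] (setB st.1 p.1 p.2 true) [p]).1])
          else st) (vis, ([] : List (List (Nat × Nat))))).2).foldl
            (fun a c => if c.length > a then c.length else a) m) := by
  intro cs
  induction cs with
  | nil => intro vis m; simp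
  | cons p cs ih =>
    intro vis m
    simp only [List.foldl_cons]
    by_cases hc : getG grid p.1 p.2 = 0 ∧ getB vis p.1 p.2 = false
    · rw [if_pos hc, if_pos hc,
        floodCount_eq grid rows cols fuel [p] _ 1 [p] (by simp)]
      dsimp only
      simp only [List.nil_append]
      rw [ih, collect_acc grid rows cols fuel cs _ [_]]
      simp
    · rw [if_neg hc, if_neg hc]
      exact ih _ _

-- A's second pass equals "fill the non-maximal collected components"
theorem pass2_eq (grid0 : List (List Int)) (rows cols fuel M : Nat) :
    ∀ (cs : List (Nat × Nat)) g vis,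
      (∀ p ∈ cs, p.1 < rows ∧ p.2 < cols) → VisDims vis rows cols →
      (∀ u w, getB vis u w = false → getG g u w = getG grid0 u w) →
      cs.foldl (fun st p =>
          if getG st.1 p.1 p.2 = 0 ∧ getB st.2 p.1 p.2 = false then
            (if (floodPos st.1 rows cols fuel [p] (setB st.2 p.1 p.2 true) [p]).1.length ≠ M then
               (floodPos st.1 rows cols fuel [p] (setB st.2 p.1 p.2 true) [p]).1.foldl
                 (fun gg q => setG gg q.1 q.2 4) st.1
             else st.1,
             (floodPos st.1 rows cols fuel [p] (setB st.2 p.1 p.2 true) [p]).2)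
          else st) (g, vis) =
        (((cs.foldl (fun st p =>
          if getG grid0 p.1 p.2 = 0 ∧ getB st.1 p.1 p.2 = false then
            ((floodFill grid0 rows cols fuel [p] (setB st.1 p.1 p.2 true) [p]).2,
              st.2 ++ [(floodFill grid0 rows cols fuel [p] (setB st.1 p.1 p.2 true) [p]).1])
          else st) (vis, ([] : List (List (Nat × Nat))))).2).foldl
            (fun g c => if c.length ≠ M then c.foldl (fun gg q => setG gg q.1 q.2 4) g else g) g,
         (cs.foldl (fun st p =>
          if getG grid0 p.1 p.2 = 0 ∧ getB st.1 p.1 p.2 = false then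
            ((floodFill grid0 rows cols fuel [p] (setB st.1 p.1 p.2 true) [p]).2,
              st.2 ++ [(floodFill grid0 rows cols fuel [p] (setB st.1 p.1 p.2 true) [p]).1])
          else st) (vis, ([] : List (List (Nat × Nat))))).1) := by
  intro cs
  induction cs with
  | nil => intro g vis hb hd hag; simp
  | cons p cs ih =>
    intro g vis hb hd hag
    simp only [List.foldl_cons]
    have hbp := hb p (List.mem_cons_self ..)
    have hvd : (vis.getD p.1 []).length = cols := visDims_getD hd hbp.1
    have hcond : (getG g p.1 p.2 = 0 ∧ getB vis p.1 p.2 = false) ↔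
        (getG grid0 p.1 p.2 = 0 ∧ getB vis p.1 p.2 = false) := by
      constructor
      · rintro ⟨h1, h2⟩; exact ⟨by rw [← hag _ _ h2]; exact h1, h2⟩
      · rintro ⟨h1, h2⟩; exact ⟨by rw [hag _ _ h2]; exact h1, h2⟩
    by_cases hA : getG g p.1 p.2 = 0 ∧ getB vis p.1 p.2 = false
    · rw [if_pos hA, if_pos (hcond.mp hA)]
      have hLe0 : VisLe vis (setB vis p.1 p.2 true) := visLe_setB _ _ _
      have hag' : ∀ u w, getB (setB vis p.1 p.2 true) u w = false →
          getG g u w = getG grid0 u w := by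
        intro u w hf
        refine hag u w ?_
        cases hv : getB vis u w
        · rfl
        · rw [hLe0 _ _ hv] at hf; exact hf
      have hflood :
          floodPos g rows cols fuel [p] (setB vis p.1 p.2 true) [p] =
            floodFill grid0 rows cols fuel [p] (setB vis p.1 p.2 true) [p] := by
        rw [floodPos_eq_floodFill]
        exact floodFill_agree g grid0 rows cols _ hag' fuel _ _ _ (visLe_refl _)
      rw [hflood]
      have hself : getB (setB vis p.1 p.2 true) p.1 p.2 = true :=
        getB_setB_self _ _ _ (by rw [hd.1]; exact hbp.1) (by rw [hvd]; exact hbp.2)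
      obtain ⟨hd2, hpos2⟩ :=
        floodFill_inv grid0 rows cols fuel [p] (setB vis p.1 p.2 true) [p]
          (setB_dims hd _ _ _)
          (by intro q hq; rcases List.mem_cons.mp hq with rfl | hq; exact hself; cases hq)
          (by intro q hq; rcases List.mem_cons.mp hq with rfl | hq; exact hself; cases hq)
      have hLe2 : VisLe vis (floodFill grid0 rows cols fuel [p] (setB vis p.1 p.2 true) [p]).2 :=
        visLe_trans hLe0 (floodFill_visLe grid0 rows cols fuel _ _ _)
      have hag2 : ∀ u w,
          getB (floodFill grid0 rows cols fuel [p] (setB vis p.1 p.2 true) [p]).2 u w = false →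
          getG (if (floodFill grid0 rows cols fuel [p] (setB vis p.1 p.2 true) [p]).1.length ≠ M then
               (floodFill grid0 rows cols fuel [p] (setB vis p.1 p.2 true) [p]).1.foldl
                 (fun gg q => setG gg q.1 q.2 4) g
             else g) u w = getG grid0 u w := by
        intro u w hf
        have hnm : (u, w) ∉ (floodFill grid0 rows cols fuel [p] (setB vis p.1 p.2 true) [p]).1 := by
          intro hm
          have := hpos2 _ hm
          rw [hf] at this
          exact Bool.false_ne_true this
        have hvf : getB vis u w = false := by
          cases hv : getB vis u w
          · rfl
          · rw [hLe2 _ _ hv] at hf; exact hf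
        split_ifs with hl
        · rw [getG_fill_not_mem _ _ _ _ hnm]; exact hag _ _ hvf
        · exact hag _ _ hvf
      rw [ih _ _ (fun q hq => hb q (List.mem_cons_of_mem _ hq)) hd2 hag2]
      simp only [List.nil_append]
      rw [collect_acc grid0 rows cols fuel cs _ [_]]
      simp
    · rw [if_neg hA, if_neg (fun h => hA (hcond.mpr h))]
      exact ih _ _ (fun q hq => hb q (List.mem_cons_of_mem _ hq)) hd hag

-- A's running "if cnt > m then cnt else m" is the fold of Nat.max over the lengths
theorem maxfold_eq : ∀ (comps : List (List (Nat × Nat))) (m : Nat),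
    comps.foldl (fun a c => if c.length > a then c.length else a) m =
      (comps.map List.length).foldl Nat.max m := by
  intro comps
  induction comps with
  | nil => intro m; rfl
  | cons c cs ih =>
    intro m
    simp only [List.foldl_cons, List.map_cons]
    rw [ih]
    congr 1
    rcases Nat.lt_or_ge m c.length with h | h
    · rw [if_pos h]; exact (Nat.max_eq_right h.le).symm
    · rw [if_neg (by omega)]; exact (Nat.max_eq_left h).symm

-- ============ new lemmas: B's set-based scan equals the reference collection ============

-- the visited matrix and B's `seen` set mark exactly the same cells
def SVis (vis : List (List Bool)) (seen : PySem.Set (Nat × Nat)) : Prop :=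
  ∀ p : Nat × Nat, getB vis p.1 p.2 = true ↔ p ∈ seen

theorem svis_false {vis : List (List Bool)} {seen : PySem.Set (Nat × Nat)}
    (h : SVis vis seen) (p : Nat × Nat) :
    getB vis p.1 p.2 = false ↔ PySem.Set.contains seen p = false := by
  rw [← Bool.not_eq_true, ← Bool.not_eq_true]
  exact not_congr ((h p).trans (by simp [PySem.Set.contains]))

theorem svis_setB {vis : List (List Bool)} {seen : PySem.Set (Nat × Nat)} {rows cols : Nat}
    (h : SVis vis seen) (hd : VisDims vis rows cols) {a b : Nat}
    (ha : a < rows) (hb : b < cols) :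
    SVis (setB vis a b true) (PySem.Set.add seen (a, b)) := by
  intro p
  have hav : a < vis.length := by rw [hd.1]; exact ha
  have hbv : b < (vis.getD a []).length := by rw [visDims_getD hd ha]; exact hb
  rw [getB_setB, PySem.Set.mem_add]
  split_ifs with hif
  · simp only [true_iff]
    right
    obtain ⟨h1, -, h2, -⟩ := hif
    cases p
    simp_all
  · rw [h p]
    constructor
    · exact Or.inl
    · rintro (hm | rfl)
      · exact hm
      · exact absurd ⟨rfl, hav, rfl, hbv⟩ hif

-- B's four neighbour tuples are the deltas mapped over
theorem nbrs_eq_map (x y : Nat) :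
    nbrs x y = ([(0, 1), (0, -1), (1, 0), (-1, 0)] : List (Int × Int)).map
      (fun d => ((x : Int) + d.1, (y : Int) + d.2)) := by
  simp [nbrs, sub_eq_add_neg]

theorem ofList_single {α : Type} [BEq α] (q : α) : PySem.Set.ofList [q] = [q] := by
  simp [PySem.Set.ofList, PySem.Set.add]

theorem neigh_rel (g : List (List Int)) (rows cols x y : Nat) :
    ∀ (ds : List (Int × Int)) (stack : List (Nat × Nat)) vis seen comp,
      SVis vis seen → VisDims vis rows cols → (∀ q ∈ comp, q ∈ seen) →
      (neighFill g rows cols x y ds (stack, vis, comp)).1 =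
        (ds.foldl (fun st d => step g rows cols st ((x : Int) + d.1, (y : Int) + d.2))
          (stack, seen, comp)).1 ∧
      SVis (neighFill g rows cols x y ds (stack, vis, comp)).2.1
        (ds.foldl (fun st d => step g rows cols st ((x : Int) + d.1, (y : Int) + d.2))
          (stack, seen, comp)).2.1 ∧
      VisDims (neighFill g rows cols x y ds (stack, vis, comp)).2.1 rows cols ∧
      (neighFill g rows cols x y ds (stack, vis, comp)).2.2 =
        (ds.foldl (fun st d => step g rows cols st ((x : Int) + d.1, (y : Int) + d.2))
          (stack, seen, comp)).2.2 ∧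
      (∀ q ∈ (ds.foldl (fun st d => step g rows cols st ((x : Int) + d.1, (y : Int) + d.2))
          (stack, seen, comp)).2.2,
        q ∈ (ds.foldl (fun st d => step g rows cols st ((x : Int) + d.1, (y : Int) + d.2))
          (stack, seen, comp)).2.1) := by
  intro ds
  induction ds with
  | nil => intro stack vis seen comp h hd hsub; exact ⟨rfl, h, hd, rfl, hsub⟩
  | cons d ds ih =>
    intro stack vis seen comp h hd hsub
    simp only [neighFill, List.foldl_cons, step]
    have hiff : (0 ≤ (x : Int) + d.1 ∧ (x : Int) + d.1 < (rows : Int) ∧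
          0 ≤ (y : Int) + d.2 ∧ (y : Int) + d.2 < (cols : Int) ∧
          getB vis ((x : Int) + d.1).toNat ((y : Int) + d.2).toNat = false ∧
          getG g ((x : Int) + d.1).toNat ((y : Int) + d.2).toNat = 0) ↔
        (0 ≤ (x : Int) + d.1 ∧ (x : Int) + d.1 < (rows : Int) ∧
          0 ≤ (y : Int) + d.2 ∧ (y : Int) + d.2 < (cols : Int) ∧
          PySem.Set.contains seen (((x : Int) + d.1).toNat, ((y : Int) + d.2).toNat) = false ∧
          getG g ((x : Int) + d.1).toNat ((y : Int) + d.2).toNat = 0) := by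
      have := svis_false h (((x : Int) + d.1).toNat, ((y : Int) + d.2).toNat)
      tauto
    by_cases hc : 0 ≤ (x : Int) + d.1 ∧ (x : Int) + d.1 < (rows : Int) ∧
        0 ≤ (y : Int) + d.2 ∧ (y : Int) + d.2 < (cols : Int) ∧
        getB vis ((x : Int) + d.1).toNat ((y : Int) + d.2).toNat = false ∧
        getG g ((x : Int) + d.1).toNat ((y : Int) + d.2).toNat = 0
    · rw [if_pos hc, if_pos (hiff.mp hc)]
      obtain ⟨h1, h2, h3, h4, h5, h6⟩ := hc
      have hqr : ((x : Int) + d.1).toNat < rows := by omega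
      have hqc : ((y : Int) + d.2).toNat < cols := by omega
      have hnotseen : (((x : Int) + d.1).toNat, ((y : Int) + d.2).toNat) ∉ seen := by
        intro hm
        rw [(h _).mpr hm] at h5
        cases h5
      have hadd : PySem.Set.add comp (((x : Int) + d.1).toNat, ((y : Int) + d.2).toNat) =
          comp ++ [(((x : Int) + d.1).toNat, ((y : Int) + d.2).toNat)] := by
        rw [PySem.Set.add, if_neg]
        intro hct
        exact hnotseen (hsub _ (List.contains_iff_mem.mp hct))
      rw [hadd]
      refine ih _ _ _ _ (svis_setB h hd hqr hqc) (setB_dims hd _ _ _) ?_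
      intro q hq
      rcases List.mem_append.mp hq with hq | hq
      · exact (PySem.Set.mem_add ..).mpr (Or.inl (hsub _ hq))
      · simp only [List.mem_singleton] at hq
        subst hq
        exact (PySem.Set.mem_add ..).mpr (Or.inr rfl)
    · rw [if_neg hc, if_neg (fun hn => hc (hiff.mpr hn))]
      exact ih _ _ _ _ h hd hsub

theorem flood_rel (g : List (List Int)) (rows cols : Nat) :
    ∀ (fuel : Nat) (stack : List (Nat × Nat)) vis seen comp,
      SVis vis seen → VisDims vis rows cols → (∀ q ∈ comp, q ∈ seen) →
      (floodFill g rows cols fuel stack vis comp).1 =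
        (bfs g rows cols fuel stack seen comp).2 ∧
      SVis (floodFill g rows cols fuel stack vis comp).2
        (bfs g rows cols fuel stack seen comp).1 ∧
      VisDims (floodFill g rows cols fuel stack vis comp).2 rows cols := by
  intro fuel
  induction fuel with
  | zero => intro stack vis seen comp h hd hsub; exact ⟨rfl, h, hd⟩
  | succ fuel ih =>
    rintro (_ | ⟨⟨x, y⟩, rest⟩) vis seen comp h hd hsub
    · exact ⟨rfl, h, hd⟩
    · simp only [floodFill, bfs]
      rw [nbrs_eq_map, List.foldl_map]
      obtain ⟨e1, hS, hD, e2, hsub'⟩ :=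
        neigh_rel g rows cols x y [(0, 1), (0, -1), (1, 0), (-1, 0)] rest vis seen comp h hd hsub
      rw [e1, e2]
      exact ih _ _ _ _ hS hD hsub'

-- the flat scan collects exactly the reference components
theorem collect_rel (grid : List (List Int)) (rows cols fuel : Nat) :
    ∀ (cs : List (Nat × Nat)) vis seen (comps : List (List (Nat × Nat))),
      SVis vis seen → VisDims vis rows cols → (∀ p ∈ cs, p.1 < rows ∧ p.2 < cols) →
      (cs.foldl (fun st p =>
          if getG grid p.1 p.2 = 0 ∧ getB st.1 p.1 p.2 = false then
            ((floodFill grid rows cols fuel [p] (setB st.1 p.1 p.2 true) [p]).2,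
              st.2 ++ [(floodFill grid rows cols fuel [p] (setB st.1 p.1 p.2 true) [p]).1])
          else st) (vis, comps)).2 =
        (cs.foldl (fun st p =>
          if getG grid p.1 p.2 = 0 ∧ PySem.Set.contains st.1 (p.1, p.2) = false then
            ((bfs grid rows cols fuel [(p.1, p.2)]
                (PySem.Set.add st.1 (p.1, p.2)) (PySem.Set.ofList [(p.1, p.2)])).1,
              st.2 ++ [(bfs grid rows cols fuel [(p.1, p.2)]
                (PySem.Set.add st.1 (p.1, p.2)) (PySem.Set.ofList [(p.1, p.2)])).2])
          else st) (seen, comps)).2 := by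
  intro cs
  induction cs with
  | nil => intro vis seen comps h hd hb; rfl
  | cons p cs ih =>
    intro vis seen comps h hd hb
    simp only [List.foldl_cons, Prod.mk.eta]
    have hiff := svis_false h p
    by_cases hc : getG grid p.1 p.2 = 0 ∧ getB vis p.1 p.2 = false
    · rw [if_pos hc, if_pos ⟨hc.1, hiff.mp hc.2⟩]
      have hp := hb p (List.mem_cons_self ..)
      rw [ofList_single]
      obtain ⟨e1, hS, hD⟩ :=
        flood_rel grid rows cols fuel [p] (setB vis p.1 p.2 true)
          (PySem.Set.add seen p) [p]
          (by have := svis_setB h hd hp.1 hp.2; simpa using this)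
          (setB_dims hd _ _ _)
          (by intro q hq
              simp only [List.mem_singleton] at hq
              subst hq
              exact (PySem.Set.mem_add ..).mpr (Or.inr rfl))
      rw [e1]
      exact ih _ _ _ hS hD (fun q hq => hb q (List.mem_cons_of_mem _ hq))
    · rw [if_neg hc, if_neg (fun hn => hc ⟨hn.1, hiff.mpr hn.2⟩)]
      exact ih _ _ _ h hd (fun q hq => hb q (List.mem_cons_of_mem _ hq))

-- the flat index scan is the scan over the cell list
theorem range_mul_eq_cells (rows cols : Nat) :
    List.range (rows * cols) = (cells rows cols).map (fun p => p.1 * cols + p.2) := by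
  induction rows with
  | zero => simp [cells]
  | succ r ih =>
    rw [Nat.succ_mul, List.range_add, ih]
    unfold cells
    rw [List.range_succ, List.flatMap_append, List.map_append]
    simp [List.map_map, Function.comp]

-- ============ new lemmas: B's functional rebuild equals the sequential fills ============

theorem length_setG (g : List (List Int)) (a b : Nat) (v : Int) :
    (setG g a b v).length = g.length := by
  simp [setG]

theorem rowlen_setG (g : List (List Int)) (a b : Nat) (v : Int) (i : Nat) :
    ((setG g a b v).getD i []).length = (g.getD i []).length := by
  rw [setG, pv_getD_set]
  split_ifs with hif
  · obtain ⟨h1, h2⟩ := hif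
    subst h1
    simp
  · rfl

theorem length_fills (pos : List (Nat × Nat)) (g : List (List Int)) :
    ((pos.foldl (fun gg q => setG gg q.1 q.2 4) g).length = g.length) ∧
    (∀ i, ((pos.foldl (fun gg q => setG gg q.1 q.2 4) g).getD i []).length =
      (g.getD i []).length) := by
  induction pos generalizing g with
  | nil => exact ⟨rfl, fun _ => rfl⟩
  | cons q rest ih =>
    simp only [List.foldl_cons]
    refine ⟨?_, fun i => ?_⟩
    · rw [(ih _).1, length_setG]
    · rw [(ih _).2, rowlen_setG]

theorem getG_fills (pos : List (Nat × Nat)) (g : List (List Int)) (x y : Nat) :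
    getG (pos.foldl (fun gg q => setG gg q.1 q.2 4) g) x y =
      if (x, y) ∈ pos ∧ x < g.length ∧ y < (g.getD x []).length then 4
      else getG g x y := by
  induction pos generalizing g with
  | nil => simp
  | cons q rest ih =>
    simp only [List.foldl_cons]
    rw [ih, length_setG, rowlen_setG]
    by_cases hrest : (x, y) ∈ rest ∧ x < g.length ∧ y < (g.getD x []).length
    · rw [if_pos hrest, if_pos ⟨List.mem_cons_of_mem _ hrest.1, hrest.2⟩]
    · rw [if_neg hrest, getG_setG]
      by_cases hq : q.1 = x ∧ q.1 < g.length ∧ q.2 = y ∧ q.2 < (g.getD q.1 []).length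
      · obtain ⟨h1, h2, h3, h4⟩ := hq
        have hqxy : q = (x, y) := by rw [← h1, ← h3]
        rw [if_pos ⟨h1, h2, h3, h4⟩, if_pos ⟨by rw [← hqxy]; exact List.mem_cons_self ..,
          by rw [← h1]; exact h2, by rw [← h3, ← h1]; exact h4⟩]
      · rw [if_neg hq, if_neg]
        rintro ⟨hm, hx, hy⟩
        rcases List.mem_cons.mp hm with he | hm
        · exact hq ⟨by rw [← he], by rw [← he]; exact hx, by rw [← he], by rw [← he]; exact hy⟩
        · exact hrest ⟨hm, hx, hy⟩

theorem length_compsFold (M : Nat) (comps : List (List (Nat × Nat))) (g : List (List Int)) :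
    ((comps.foldl (fun gg c => if c.length ≠ M then
        c.foldl (fun g2 q => setG g2 q.1 q.2 4) gg else gg) g).length = g.length) ∧
    (∀ i, ((comps.foldl (fun gg c => if c.length ≠ M then
        c.foldl (fun g2 q => setG g2 q.1 q.2 4) gg else gg) g).getD i []).length =
      (g.getD i []).length) := by
  induction comps generalizing g with
  | nil => exact ⟨rfl, fun _ => rfl⟩
  | cons c rest ih =>
    simp only [List.foldl_cons]
    refine ⟨?_, fun i => ?_⟩
    · rw [(ih _).1]
      split_ifs
      · exact (length_fills _ _).1
      · rfl
    · rw [(ih _).2]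
      split_ifs
      · exact (length_fills _ _).2 i
      · rfl

theorem getG_compsFold (M : Nat) (comps : List (List (Nat × Nat))) (g : List (List Int))
    (x y : Nat) :
    getG (comps.foldl (fun gg c => if c.length ≠ M then
        c.foldl (fun g2 q => setG g2 q.1 q.2 4) gg else gg) g) x y =
      if (∃ c ∈ comps, c.length ≠ M ∧ (x, y) ∈ c) ∧ x < g.length ∧ y < (g.getD x []).length
      then 4 else getG g x y := by
  induction comps generalizing g with
  | nil => simp
  | cons c rest ih =>
    simp only [List.foldl_cons]
    rw [ih]
    have hl1 : (if c.length ≠ M then c.foldl (fun g2 q => setG g2 q.1 q.2 4) g else g).length =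
        g.length := by
      split_ifs
      · exact (length_fills _ _).1
      · rfl
    have hl2 : ((if c.length ≠ M then c.foldl (fun g2 q => setG g2 q.1 q.2 4) g else g).getD
        x []).length = (g.getD x []).length := by
      split_ifs
      · exact (length_fills _ _).2 x
      · rfl
    rw [hl1, hl2]
    by_cases hB : x < g.length ∧ y < (g.getD x []).length
    · by_cases h1 : ∃ cl ∈ rest, cl.length ≠ M ∧ (x, y) ∈ cl
      · rw [if_pos ⟨h1, hB⟩, if_pos ⟨by
          obtain ⟨cl, hcl, h⟩ := h1
          exact ⟨cl, List.mem_cons_of_mem _ hcl, h⟩, hB⟩]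
      · rw [if_neg (by rintro ⟨h, -⟩; exact h1 h)]
        by_cases hc : c.length ≠ M
        · rw [if_pos hc, getG_fills]
          by_cases hm : (x, y) ∈ c
          · rw [if_pos ⟨hm, hB⟩, if_pos ⟨⟨c, List.mem_cons_self .., hc, hm⟩, hB⟩]
          · rw [if_neg (by rintro ⟨h, -⟩; exact hm h), if_neg]
            rintro ⟨⟨cl, hcl, hne, hmem⟩, -⟩
            rcases List.mem_cons.mp hcl with rfl | hcl
            · exact hm hmem
            · exact h1 ⟨cl, hcl, hne, hmem⟩
        · rw [if_neg hc, if_neg]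
          rintro ⟨⟨cl, hcl, hne, hmem⟩, -⟩
          rcases List.mem_cons.mp hcl with rfl | hcl
          · exact hc hne
          · exact h1 ⟨cl, hcl, hne, hmem⟩
    · by_cases hc : c.length ≠ M
      · rw [if_pos hc, getG_fills, if_neg (by rintro ⟨-, h⟩; exact hB h),
          if_neg (by rintro ⟨-, h⟩; exact hB h), if_neg (by rintro ⟨-, h⟩; exact hB h)]
      · rw [if_neg hc, if_neg (by rintro ⟨-, h⟩; exact hB h),
          if_neg (by rintro ⟨-, h⟩; exact hB h)]

-- B's Int-valued max fold is the Nat max fold of the lengths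
theorem maxfold_int (comps : List (List (Nat × Nat))) (m : Nat) :
    (comps.map PySem.Set.len).foldl max (m : Int) =
      (((comps.map List.length).foldl Nat.max m : Nat) : Int) := by
  induction comps generalizing m with
  | nil => simp
  | cons c rest ih =>
    simp only [List.map_cons, List.foldl_cons]
    have : max (m : Int) (PySem.Set.len c) = ((Nat.max m c.length : Nat) : Int) := by
      simp [PySem.Set.len, Nat.cast_max]
    rw [this, ih]

-- the whole rebuild: fill set membership vs sequential setG folds
theorem rebuild_eq (comps : List (List (Nat × Nat))) (grid : List (List Int)) (M : Nat) :
    comps.foldl (fun gg c => if c.length ≠ M then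
        c.foldl (fun g2 q => setG g2 q.1 q.2 4) gg else gg) grid =
      grid.mapIdx (fun i row => row.mapIdx (fun j v =>
        if PySem.Set.contains (PySem.Set.ofList
            ((comps.filter (fun c => decide (PySem.Set.len c ≠ ((M : Nat) : Int)))).flatMap
              (fun c => c))) (i, j) = true then 4 else v)) := by
  have hglen : (comps.foldl (fun gg c => if c.length ≠ M then
      c.foldl (fun g2 q => setG g2 q.1 q.2 4) gg else gg) grid).length = grid.length :=
    (length_compsFold M comps grid).1
  apply List.ext_getElem
  · rw [hglen, List.length_mapIdx]
  intro i h1 h2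
  have hg : i < grid.length := by rw [← hglen]; exact h1
  rw [List.getElem_mapIdx]
  have hrlen : ((comps.foldl (fun gg c => if c.length ≠ M then
      c.foldl (fun g2 q => setG g2 q.1 q.2 4) gg else gg) grid).getD i []).length =
      (grid.getD i []).length := (length_compsFold M comps grid).2 i
  apply List.ext_getElem
  · rw [List.length_mapIdx, ← List.getD_eq_getElem _ _ h1, hrlen,
      List.getD_eq_getElem _ _ hg]
  intro j hj1 hj2
  rw [List.length_mapIdx] at hj2
  have hrowj : j < (grid.getD i []).length := by
    rw [List.getD_eq_getElem _ _ hg]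
    exact hj2
  have hmem : (PySem.Set.contains (PySem.Set.ofList
      ((comps.filter (fun c => decide (PySem.Set.len c ≠ ((M : Nat) : Int)))).flatMap
        (fun c => c))) (i, j) = true) ↔ (∃ c ∈ comps, c.length ≠ M ∧ (i, j) ∈ c) := by
    simp only [PySem.Set.contains, List.contains_iff_mem, PySem.Set.mem_ofList,
      List.mem_flatMap, List.mem_filter, decide_eq_true_eq, PySem.Set.len, ne_eq,
      Nat.cast_inj]
    constructor
    · rintro ⟨c, ⟨hc1, hc2⟩, hc3⟩
      exact ⟨c, hc1, hc2, hc3⟩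
    · rintro ⟨c, hc1, hc2, hc3⟩
      exact ⟨c, ⟨hc1, hc2⟩, hc3⟩
  have hL : (comps.foldl (fun gg c => if c.length ≠ M then
      c.foldl (fun g2 q => setG g2 q.1 q.2 4) gg else gg) grid)[i][j] =
      getG (comps.foldl (fun gg c => if c.length ≠ M then
        c.foldl (fun g2 q => setG g2 q.1 q.2 4) gg else gg) grid) i j := by
    rw [getG, List.getD_eq_getElem _ _ h1, List.getD_eq_getElem _ _ hj1]
  rw [List.getElem_mapIdx, hL, getG_compsFold]
  by_cases hx : ∃ c ∈ comps, c.length ≠ M ∧ (i, j) ∈ c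
  · rw [if_pos ⟨hx, hg, hrowj⟩, if_pos (hmem.mpr hx)]
  · rw [if_neg (by rintro ⟨h, -⟩; exact hx h), if_neg (fun hcon => hx (hmem.mp hcon)),
      getG, List.getD_eq_getElem _ _ hg, List.getD_eq_getElem _ _ hj2]

theorem getB_rep (rows cols x y : Nat) :
    getB (List.replicate rows (List.replicate cols false)) x y = false := by
  unfold getB
  by_cases hx : x < rows
  · have hrow : (List.replicate rows (List.replicate cols false)).getD x [] =
        List.replicate cols false := by
      rw [List.getD_eq_getElem _ _ (by simpa using hx), List.getElem_replicate]
    rw [hrow]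
    by_cases hy : y < cols
    · rw [List.getD_eq_getElem _ _ (by simpa using hy), List.getElem_replicate]
    · rw [List.getD_eq_default _ _ (by simpa using Nat.le_of_not_lt hy)]
  · have hrow : (List.replicate rows (List.replicate cols false)).getD x [] = [] :=
      List.getD_eq_default _ _ (by simpa using Nat.le_of_not_lt hx)
    rw [hrow]
    rfl

theorem svis_init (rows cols : Nat) :
    SVis (List.replicate rows (List.replicate cols false)) PySem.Set.empty := by
  intro p
  rw [getB_rep]
  simp [PySem.Set.empty]

-- ===== VERDICT (by name: the statement is the Claim_ definition above) =====
theorem transform_spec : Claim_equal_transform := by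
  intro L _hdom hpre
  unfold Spec_transform transform transform_alt
  by_cases hE : L.isEmpty
  · rw [if_pos hE, if_pos hE]
  by_cases hH : (L.headD []).isEmpty
  · rw [if_neg hE, if_neg hE, if_pos hH, if_pos hH]
  rw [if_neg hE, if_neg hH, if_neg hE, if_neg hH]
  dsimp only
  have hc0 : 0 < (L.headD []).length := by
    have hne : L.headD [] ≠ [] := fun h => hH (by rw [h]; rfl)
    exact List.length_pos_of_ne_nil hne
  -- B's flat index scan is the scan over the cell list
  have hS : (List.range (L.length * (L.headD []).length)).foldl (fun st idx =>
        if getG L (idx / (L.headD []).length) (idx % (L.headD []).length) = 0 ∧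
            PySem.Set.contains st.1 (idx / (L.headD []).length, idx % (L.headD []).length) = false then
          ((bfs L L.length (L.headD []).length (L.length * (L.headD []).length + 1)
              [(idx / (L.headD []).length, idx % (L.headD []).length)]
              (PySem.Set.add st.1 (idx / (L.headD []).length, idx % (L.headD []).length))
              (PySem.Set.ofList [(idx / (L.headD []).length, idx % (L.headD []).length)])).1,
            st.2 ++ [(bfs L L.length (L.headD []).length (L.length * (L.headD []).length + 1)
              [(idx / (L.headD []).length, idx % (L.headD []).length)]
              (PySem.Set.add st.1 (idx / (L.headD []).length, idx % (L.headD []).length))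
              (PySem.Set.ofList [(idx / (L.headD []).length, idx % (L.headD []).length)])).2])
        else st)
      ((PySem.Set.empty : PySem.Set (Nat × Nat)), ([] : List (PySem.Set (Nat × Nat)))) =
      (cells L.length (L.headD []).length).foldl (fun st p =>
        if getG L p.1 p.2 = 0 ∧ PySem.Set.contains st.1 (p.1, p.2) = false then
          ((bfs L L.length (L.headD []).length (L.length * (L.headD []).length + 1) [(p.1, p.2)]
              (PySem.Set.add st.1 (p.1, p.2)) (PySem.Set.ofList [(p.1, p.2)])).1,
            st.2 ++ [(bfs L L.length (L.headD []).length (L.length * (L.headD []).length + 1)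
              [(p.1, p.2)] (PySem.Set.add st.1 (p.1, p.2))
              (PySem.Set.ofList [(p.1, p.2)])).2])
        else st)
      ((PySem.Set.empty : PySem.Set (Nat × Nat)), ([] : List (PySem.Set (Nat × Nat)))) := by
    rw [range_mul_eq_cells, List.foldl_map]
    refine PySem.List.foldl_congr_mem _ _ _ _ (fun st p hp => ?_)
    have hpc : p.2 < (L.headD []).length := (mem_cells.mp hp).2
    have hdiv : (p.1 * (L.headD []).length + p.2) / (L.headD []).length = p.1 := by
      rw [mul_comm, Nat.mul_add_div hc0, Nat.div_eq_of_lt hpc, Nat.add_zero]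
    have hmod : (p.1 * (L.headD []).length + p.2) % (L.headD []).length = p.2 := by
      rw [mul_comm, Nat.mul_add_mod, Nat.mod_eq_of_lt hpc]
    simp only [hdiv, hmod]
  rw [hS]
  -- B's set-based collection is the reference (matrix-based) collection
  rw [← collect_rel L L.length (L.headD []).length (L.length * (L.headD []).length + 1)
      (cells L.length (L.headD []).length)
      (List.replicate L.length (List.replicate (L.headD []).length false))
      PySem.Set.empty []
      (svis_init L.length (L.headD []).length)
      ⟨List.length_replicate, fun row hr => by rw [List.eq_of_mem_replicate hr]; exact List.length_replicate⟩
      (fun p hp => mem_cells.mp hp)]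
  -- A's two passes reduce to the reference collection + fills
  simp only [foldl_cells]
  rw [pass2_eq L L.length (L.headD []).length (L.length * (L.headD []).length + 1) _
      (cells L.length (L.headD []).length) L
      (List.replicate L.length (List.replicate (L.headD []).length false))
      (fun p hp => mem_cells.mp hp)
      ⟨List.length_replicate, fun row hr => by rw [List.eq_of_mem_replicate hr]; exact List.length_replicate⟩
      (fun u w _ => rfl)]
  rw [pass1_eq]
  rw [maxfold_eq]
  -- B's Int max over set sizes is the Nat max over the collected lengths
  have hmax : ∀ comps : List (List (Nat × Nat)),
      (comps.map PySem.Set.len).foldl max (0 : Int) =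
        (((comps.map List.length).foldl Nat.max 0 : Nat) : Int) := by
    intro comps
    simpa using maxfold_int comps 0
  rw [hmax]
  -- the sequential fills are B's functional rebuild
  rw [rebuild_eq]
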